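-- pv_equiv track=rewrite | github.com/Rajasekhar1131997/TIP102_Sessions | Unit_7/Week7Session2_SPSV1.py | count_checked_in_passengers_recursive
-- ===== SOURCE A (Python) =====
-- def count_checked_in_passengers_recursive(rooms):
--     if not rooms:
--         return 0
--     n = len(rooms)
--     left = 0
--     right = n-1
--     first_one_index = n #assuming there are no 1's initially
--     while left <=right:
--         mid = left + (right-left) // 2
--         if rooms[mid] == 1:
--             first_one_index = mid
--             right = mid - 1
--         else:
--             left = mid + 1
--     return n - first_one_index
-- ===== SOURCE B (Python) =====
-- def count_checked_in_passengers_recursive(rooms):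
--     if not rooms:
--         return 0
--     n = len(rooms)
--
--     def search(seg, offset, best):
--         # structural recursion on list slices instead of index bookkeeping:
--         # seg is the current sub-list, offset its start index in rooms
--         if not seg:
--             return best
--         m = (len(seg) - 1) // 2
--         if seg[m] == 1:
--             return search(seg[:m], offset, offset + m)
--         return search(seg[m + 1:], offset + m + 1, best)
--
--     return n - search(rooms, 0, n)
-- ===== Notes on version B (the rewrite author's own statement) =====
-- stated objective: alternative
-- what changed: A's iterative while-loop over mutable indices (left, right, first_one_index) is replaced by structural recursion on list slices: a helper search(seg, offset, best) halves the actual sub-list (seg[:m] / seg[m+1:]) and carries its start offset, so no index interval is maintained at all.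
import Mathlib
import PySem

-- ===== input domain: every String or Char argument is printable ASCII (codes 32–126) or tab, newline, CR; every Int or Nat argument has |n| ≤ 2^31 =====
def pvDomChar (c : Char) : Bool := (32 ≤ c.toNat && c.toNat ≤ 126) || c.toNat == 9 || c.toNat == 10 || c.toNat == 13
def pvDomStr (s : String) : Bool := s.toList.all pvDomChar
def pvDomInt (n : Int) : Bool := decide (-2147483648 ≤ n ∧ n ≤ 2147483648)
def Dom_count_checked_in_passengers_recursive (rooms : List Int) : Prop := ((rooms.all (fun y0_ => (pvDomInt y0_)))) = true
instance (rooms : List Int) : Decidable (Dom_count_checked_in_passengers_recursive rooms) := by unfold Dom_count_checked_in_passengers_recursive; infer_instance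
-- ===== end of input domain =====

-- ===== PORT A =====
-- B replaces A's index-interval while-loop by structural recursion on list slices (alternative decomposition, same result).
-- pvALoop: literal port of A's `while left <= right:` loop over the mutable state
-- (left, right, first_one_index); the Nat fuel only makes the loop total (callers
-- pass fuel larger than the interval length, so it never runs out).
def pvALoop (rooms : List Int) (fuel : Nat) (left right fidx : Int) : Int :=
  match fuel with
  | 0 => fidx
  | fuel + 1 =>
    if left ≤ right then
      let mid := left + PySem.Int.floordiv (right - left) 2
      if PySem.List.pyGet? rooms mid = some 1 then
        pvALoop rooms fuel left (mid - 1) mid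
      else
        pvALoop rooms fuel (mid + 1) right fidx
    else fidx

def count_checked_in_passengers_recursive (rooms : List Int) : Int :=
  if rooms = [] then 0
  else
    let n : Int := rooms.length
    n - pvALoop rooms (rooms.length + 1) 0 (n - 1) n

-- ===== PORT B =====
-- pvBSearch: port of Source B's nested helper `search(seg, offset, best)`; structural
-- recursion on the sub-list seg (seg[:m] / seg[m+1:]), no index interval.
def pvBSearch (seg : List Int) (offset best : Int) : Int :=
  match seg with
  | [] => best
  | x :: xs =>
    let m : Nat := ((x :: xs).length - 1) / 2
    if PySem.List.pyGet? (x :: xs) (m : Int) = some 1 then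
      pvBSearch ((x :: xs).take m) offset (offset + m)
    else
      pvBSearch ((x :: xs).drop (m + 1)) (offset + m + 1) best
termination_by seg.length
decreasing_by
  all_goals (simp; try omega)

def count_checked_in_passengers_recursive_alt (rooms : List Int) : Int :=
  if rooms = [] then 0
  else (rooms.length : Int) - pvBSearch rooms 0 (rooms.length : Int)

-- ===== PRECONDITION & SPEC =====
def Spec_count_checked_in_passengers_recursive (rooms : List Int) (out : Int) : Prop := out = count_checked_in_passengers_recursive_alt rooms
instance (rooms : List Int) (out : Int) : Decidable (Spec_count_checked_in_passengers_recursive rooms out) := by unfold Spec_count_checked_in_passengers_recursive; infer_instance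

-- ===== CLAIM (what is proved, stated in full; the proofs are below) =====
def Claim_equal_count_checked_in_passengers_recursive : Prop := ∀ (rooms : List Int), Dom_count_checked_in_passengers_recursive rooms → Spec_count_checked_in_passengers_recursive rooms (count_checked_in_passengers_recursive rooms)

-- ===== LEMMAS AND PROOFS =====
-- Invariant: A's loop on the interval [l, r-1] computes the same value as B's
-- recursion on the slice (rooms.drop l).take (r - l), with offset l.
theorem pvALoop_eq_pvBSearch (rooms : List Int) (fuel : Nat) : ∀ (l r : Nat) (fidx : Int),
    l ≤ r → r ≤ rooms.length → r - l < fuel →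
    pvALoop rooms fuel l ((r : Int) - 1) fidx
      = pvBSearch ((rooms.drop l).take (r - l)) l fidx := by
  induction fuel with
  | zero => intro l r fidx _ _ h; omega
  | succ fuel ih =>
    intro l r fidx hlr hr hfuel
    by_cases hcase : l < r
    · have hlen : ((rooms.drop l).take (r - l)).length = r - l := by
        simp [List.length_take, List.length_drop]; omega
      obtain ⟨y, ys, hy⟩ := List.exists_cons_of_ne_nil (by
        intro h; rw [h] at hlen; simp at hlen; omega :
        (rooms.drop l).take (r - l) ≠ [])
      have hmid : (l : Int) + PySem.Int.floordiv ((r : Int) - 1 - l) 2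
          = ((l + (r - l - 1) / 2 : Nat) : Int) := by
        rw [PySem.Int.floordiv_eq_ediv_of_pos (by norm_num)]
        push_cast; omega
      have hm : (r - l - 1) / 2 < r - l := by omega
      have hget : PySem.List.pyGet? rooms ((l + (r - l - 1) / 2 : Nat) : Int)
          = PySem.List.pyGet? ((rooms.drop l).take (r - l)) (((r - l - 1) / 2 : Nat) : Int) := by
        rw [PySem.List.pyGet?_natCast, PySem.List.pyGet?_natCast,
          List.getElem?_take_of_lt hm, List.getElem?_drop]
      rw [pvALoop, if_pos (by omega : (l : Int) ≤ (r : Int) - 1)]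
      rw [hy, pvBSearch, ← hy]
      simp only [hlen, hmid, hget]
      split
      · have := ih l (l + (r - l - 1) / 2) ((l + (r - l - 1) / 2 : Nat) : Int)
          (by omega) (by omega) (by omega)
        rw [this]
        have hslice : (rooms.drop l).take (l + (r - l - 1) / 2 - l)
            = ((rooms.drop l).take (r - l)).take ((r - l - 1) / 2) := by
          rw [List.take_take]; congr 1; omega
        rw [hslice]
        congr 1
      · have := ih (l + (r - l - 1) / 2 + 1) r fidx (by omega) hr (by omega)
        rw [show (((l + (r - l - 1) / 2 : Nat) : Int) + 1) = ((l + (r - l - 1) / 2 + 1 : Nat) : Int) by push_cast; ring]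
        rw [this]
        have hslice : (rooms.drop (l + (r - l - 1) / 2 + 1)).take (r - (l + (r - l - 1) / 2 + 1))
            = ((rooms.drop l).take (r - l)).drop ((r - l - 1) / 2 + 1) := by
          rw [List.drop_take, List.drop_drop]
          congr 1
          omega
        rw [hslice]
        congr 1
    · have hlr' : l = r := by omega
      subst hlr'
      rw [pvALoop, if_neg (by omega : ¬ ((l : Int) ≤ (l : Int) - 1))]
      simp [pvBSearch]

-- ===== VERDICT (by name: the statement is the Claim_ definition above) =====
theorem count_checked_in_passengers_recursive_spec : Claim_equal_count_checked_in_passengers_recursive := by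
  intro rooms _
  unfold Spec_count_checked_in_passengers_recursive
  unfold count_checked_in_passengers_recursive count_checked_in_passengers_recursive_alt
  rcases rooms with _ | ⟨x, xs⟩
  · simp
  · simp only [reduceCtorEq, if_false]
    have := pvALoop_eq_pvBSearch (x :: xs) ((x :: xs).length + 1) 0 (x :: xs).length (Int.ofNat (x :: xs).length) (Nat.zero_le _) le_rfl (by omega)
    simpa using this
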